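-- pv_equiv track=rewrite | github.com/VeeVee404/crypto-homework | Assig3/Aufgabe13&14.py | count_coincidences
-- ===== SOURCE A (Python) =====
-- def count_coincidences(ciphertext):
--     coincidences = []
--     for shift in range(1, len(ciphertext)):
--         count = 0
--         for i in range(len(ciphertext) - shift):
--             if ciphertext[i] == ciphertext[i + shift]:
--                 count += 1
--         coincidences.append(count)
--     return coincidences.index(max(coincidences)) + 1
-- ===== SOURCE B (Python) =====
-- def count_coincidences(ciphertext):
--     n = len(ciphertext)
--     counts = [0] * n
--     # group positions by symbol; pairs of equal symbols at distance d are
--     # exactly the coincidences at shift d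
--     for c in dict.fromkeys(ciphertext):
--         pos = [i for i in range(n) if ciphertext[i] == c]
--         m = len(pos)
--         for a in range(m):
--             for b in range(a + 1, m):
--                 counts[pos[b] - pos[a]] += 1
--     best = 1
--     for d in range(2, n):
--         if counts[d] > counts[best]:
--             best = d
--     return best
-- ===== Notes on version B (the rewrite author's own statement) =====
-- stated objective: faster
-- what changed: Instead of scanning all positions for every shift, B groups positions by symbol once and counts, for each unordered pair of equal symbols, one coincidence at their distance, then takes the first argmax with a running comparison; A's per-shift full scans disappear.
import Mathlib
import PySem

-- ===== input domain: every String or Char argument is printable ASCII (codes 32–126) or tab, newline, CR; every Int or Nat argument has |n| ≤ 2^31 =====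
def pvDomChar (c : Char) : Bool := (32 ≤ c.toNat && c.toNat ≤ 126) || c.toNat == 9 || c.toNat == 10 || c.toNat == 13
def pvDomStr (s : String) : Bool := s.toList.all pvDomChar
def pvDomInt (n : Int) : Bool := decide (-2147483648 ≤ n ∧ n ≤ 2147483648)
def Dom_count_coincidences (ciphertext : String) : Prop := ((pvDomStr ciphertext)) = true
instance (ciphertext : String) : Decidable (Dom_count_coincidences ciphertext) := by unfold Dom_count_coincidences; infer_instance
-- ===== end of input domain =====

-- B groups equal symbols' positions and counts coincidences per pair distance, then takes the
-- first argmax by a running comparison — a different traversal than A's per-shift full scans.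


-- ===== PORT A =====
-- literal port of A; ciphertext[i] is in range at every access, so pyGetD with a dummy default is exact
def count_coincidences (ciphertext : String) : Int :=
  let s := ciphertext.toList
  let n : Int := s.length
  let coincidences : List Int := (PySem.List.pyRange 1 n 1).foldl (fun acc shift =>
    let count : Int := (PySem.List.pyRange 0 (n - shift) 1).foldl (fun c i =>
      if PySem.List.pyGetD s i ' ' = PySem.List.pyGetD s (i + shift) ' ' then c + 1 else c) 0
    acc ++ [count]) []
  match PySem.List.max? coincidences (fun x => x) with
  | none => 0  -- max([]) raises ValueError in Python: excluded by Pre_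
  | some m => (((PySem.List.index? coincidences m).getD 0 : Nat) : Int) + 1

-- ===== PORT B =====
-- counts[j] += 1 ; exact for 0 ≤ j < counts.length (always the case: j is a distance of two positions)
def pvBump (cs : List Int) (j : Int) : List Int :=
  cs.set j.toNat (PySem.List.pyGetD cs j 0 + 1)

-- the two inner index loops of Source B: for a in range(m): for b in range(a+1, m): counts[pos[b]-pos[a]] += 1
def pvPairBumps (pos : List Int) (cs : List Int) : List Int :=
  (PySem.List.pyRange 0 (pos.length : Int) 1).foldl (fun cs1 a =>
    (PySem.List.pyRange (a + 1) (pos.length : Int) 1).foldl (fun cs2 b =>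
      pvBump cs2 (PySem.List.pyGetD pos b 0 - PySem.List.pyGetD pos a 0)) cs1) cs

def count_coincidences_alt (ciphertext : String) : Int :=
  let s := ciphertext.toList
  let n : Int := s.length
  let counts0 : List Int := List.replicate s.length 0
  let counts := (PySem.List.dedup s).foldl (fun cs c =>
    pvPairBumps ((PySem.List.pyRange 0 n 1).filter (fun i => PySem.List.pyGetD s i ' ' == c)) cs)
    counts0
  (PySem.List.pyRange 2 n 1).foldl (fun best d =>
    if PySem.List.pyGetD counts best 0 < PySem.List.pyGetD counts d 0 then d else best) 1

-- ===== PRECONDITION & SPEC =====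
-- A raises ValueError (max of the empty coincidence list) when len(ciphertext) < 2
def Pre_count_coincidences (ciphertext : String) : Prop := 2 ≤ ciphertext.toList.length
instance (ciphertext : String) : Decidable (Pre_count_coincidences ciphertext) := by unfold Pre_count_coincidences; infer_instance
def pvWitness_count_coincidences : String := "abab"

def Spec_count_coincidences (ciphertext : String) (out : Int) : Prop := out = count_coincidences_alt ciphertext
instance (ciphertext : String) (out : Int) : Decidable (Spec_count_coincidences ciphertext out) := by unfold Spec_count_coincidences; infer_instance

-- ===== CLAIM (what is proved, stated in full; the proofs are below) =====
def Claim_equal_count_coincidences : Prop := ∀ (ciphertext : String), Dom_count_coincidences ciphertext → Pre_count_coincidences ciphertext → Spec_count_coincidences ciphertext (count_coincidences ciphertext)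

-- ===== LEMMAS AND PROOFS =====

def pvDiffs : List Int → List Int
  | [] => []
  | x :: r => r.map (fun y => y - x) ++ pvDiffs r

theorem length_pvBump (cs : List Int) (j : Int) : (pvBump cs j).length = cs.length := by
  simp [pvBump]

theorem pyGetD_eq_getD (cs : List Int) (j : Int) (h : 0 ≤ j) (v : Int) :
    PySem.List.pyGetD cs j v = cs.getD j.toNat v := by
  simp [PySem.List.pyGetD, PySem.List.pyGet?_of_nonneg cs h, List.getD_eq_getElem?_getD]

theorem pyGetD_pvBump (cs : List Int) (j d : Int) (hj0 : 0 ≤ j) (hj : j < (cs.length : Int))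
    (hd : 0 ≤ d) :
    PySem.List.pyGetD (pvBump cs j) d 0
      = PySem.List.pyGetD cs d 0 + (if j = d then 1 else 0) := by
  rw [pyGetD_eq_getD _ _ hd, pyGetD_eq_getD _ _ hd, pvBump, pyGetD_eq_getD _ _ hj0]
  rcases eq_or_ne j d with rfl | hne
  · simp [List.getD_eq_getElem?_getD, (by omega : j.toNat < cs.length)]
  · have hne' : j.toNat ≠ d.toNat := by omega
    simp [List.getD_eq_getElem?_getD, List.getElem?_set, hne', hne]

theorem pyGetD_foldl_pvBump (L : List Int) (cs : List Int)
    (hL : ∀ j ∈ L, 0 ≤ j ∧ j < (cs.length : Int)) (d : Int) (hd : 0 ≤ d) :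
    PySem.List.pyGetD (L.foldl pvBump cs) d 0
      = PySem.List.pyGetD cs d 0 + L.count d := by
  induction L generalizing cs with
  | nil => simp
  | cons x r ih =>
      obtain ⟨hx0, hxl⟩ := hL x (by simp)
      rw [List.foldl_cons, ih _ (fun j hj => by
          have := hL j (by simp [hj]); simpa [length_pvBump] using this),
        pyGetD_pvBump cs x d hx0 hxl hd, List.count_cons]
      rcases eq_or_ne x d with rfl | hne
      · simp; push_cast; ring
      · simp [hne]
      

theorem pvPairBumps_nat (pos : List Int) : ∀ cs,
    (List.range pos.length).foldl (fun cs1 a =>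
      (pos.drop (a+1)).foldl (fun acc v => pvBump acc (v - pos.getD a 0)) cs1) cs
    = (pvDiffs pos).foldl pvBump cs := by
  induction pos with
  | nil => intro cs; rfl
  | cons x r ih =>
    intro cs
    rw [List.length_cons, List.range_succ_eq_map]
    simp only [List.foldl_cons, List.foldl_map, List.drop_succ_cons, List.getD_cons_succ,
      List.drop_zero, List.getD_cons_zero]
    rw [ih]
    rw [pvDiffs, List.foldl_append, List.foldl_map]

theorem pvPairBumps_eq (pos cs : List Int) :
    pvPairBumps pos cs = (pvDiffs pos).foldl pvBump cs := by
  rw [← pvPairBumps_nat pos cs, pvPairBumps, PySem.List.pyRange_zero_nat]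
  simp only [List.bind_eq_flatMap, List.flatMap_pure_eq_map, List.foldl_map]
  apply PySem.List.foldl_congr_mem
  intro acc a ha
  have h1 : ((a : Int) + 1) = ((a + 1 : Nat) : Int) := by push_cast; ring
  rw [PySem.List.pyGetD_natCast, h1, PySem.List.foldl_pyRange_pyGetD' pos 0
    (fun acc v => pvBump acc (v - pos.getD a 0)) acc (by positivity)]
  simp

theorem foldl_pvPairBumps_flat (L : List Char) (g : Char → List Int) : ∀ cs,
    L.foldl (fun cs c => pvPairBumps (g c) cs) cs = (L.flatMap (fun c => pvDiffs (g c))).foldl pvBump cs := by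
  induction L with
  | nil => intro cs; rfl
  | cons x r ih =>
    intro cs
    rw [List.foldl_cons, ih, List.flatMap_cons, List.foldl_append, pvPairBumps_eq]

theorem mem_pvDiffs (pos : List Int) (hp : pos.Pairwise (· < ·)) (j : Int) (hj : j ∈ pvDiffs pos) :
    ∃ x y, x ∈ pos ∧ y ∈ pos ∧ x < y ∧ j = y - x := by
  induction pos with
  | nil => simp [pvDiffs] at hj
  | cons x r ih =>
    rw [pvDiffs, List.mem_append] at hj
    rcases hj with hj | hj
    · obtain ⟨y, hy, rfl⟩ := List.mem_map.mp hj
      exact ⟨x, y, by simp, by simp [hy], (List.pairwise_cons.mp hp).1 y hy, rfl⟩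
    · obtain ⟨a, b, ha, hb, hab, rfl⟩ := ih (List.pairwise_cons.mp hp).2 hj
      exact ⟨a, b, by simp [ha], by simp [hb], hab, rfl⟩

theorem count_pvDiffs (pos : List Int) (hp : pos.Pairwise (· < ·)) (d : Int) (hd : 0 < d) :
    (pvDiffs pos).count d = pos.countP (fun x => decide ((x + d) ∈ pos)) := by
  induction pos with
  | nil => simp [pvDiffs]
  | cons x r ih =>
    have hxr := (List.pairwise_cons.mp hp).1
    have hr := (List.pairwise_cons.mp hp).2
    have hnodup : r.Nodup := hr.imp (fun h => ne_of_lt h)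
    rw [pvDiffs, List.count_append, ih hr, List.countP_cons]
    have h1 : (r.map (fun y => y - x)).count d = r.count (x + d) := by
      rw [List.count_eq_countP, List.count_eq_countP, List.countP_map]
      apply List.countP_congr
      intro y _; simp; constructor <;> intro h <;> omega
    have h2 : r.count (x + d) = (if (x + d) ∈ (x :: r) then 1 else 0) := by
      by_cases hmem : (x + d) ∈ r
      · rw [List.count_eq_one_of_mem hnodup hmem]; simp [hmem]
      · rw [List.count_eq_zero_of_not_mem hmem]
        simp [hmem]; omega
    have h3 : r.countP (fun z => decide ((z + d) ∈ r)) = r.countP (fun z => decide ((z + d) ∈ (x :: r))) := by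
      apply List.countP_congr
      intro z hz; simp
      intro h; exfalso; have := hxr z hz; omega
    rw [h1, h2, h3]
    by_cases hmem : (x + d) ∈ (x :: r) <;> simp [hmem] <;> omega

def pvPos (s : List Char) (c : Char) : List Int :=
  (PySem.List.pyRange 0 ((s.length : Int)) 1).filter (fun i => PySem.List.pyGetD s i ' ' == c)

theorem mem_pvPos (s : List Char) (c : Char) (x : Int) :
    x ∈ pvPos s c ↔ 0 ≤ x ∧ x < (s.length : Int) ∧ PySem.List.pyGetD s x ' ' = c := by
  simp [pvPos, List.mem_filter, PySem.List.mem_pyRange_one, and_assoc]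

theorem pairwise_pvPos (s : List Char) (c : Char) : (pvPos s c).Pairwise (· < ·) :=
  (PySem.List.pairwise_lt_pyRange_one 0 (s.length : Int)).filter _

theorem countP_pvPos (s : List Char) (c : Char) (d : Int) (hd : 0 < d) :
    (pvPos s c).countP (fun x => decide ((x + d) ∈ pvPos s c))
      = (PySem.List.pyRange 0 (s.length : Int) 1).countP
          (fun i => decide (i + d < (s.length : Int) ∧ PySem.List.pyGetD s i ' ' = c ∧ PySem.List.pyGetD s (i + d) ' ' = c)) := by
  show ((PySem.List.pyRange 0 ((s.length : Int)) 1).filter (fun i => PySem.List.pyGetD s i ' ' == c)).countP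
      (fun x => decide ((x + d) ∈ pvPos s c)) = _
  rw [List.countP_filter]
  apply List.countP_congr
  intro i hi
  have hi' := (PySem.List.mem_pyRange_one).mp hi
  have hm := mem_pvPos s c (i + d)
  simp only [Bool.and_eq_true, decide_eq_true_eq, beq_iff_eq, hm]
  constructor
  · rintro ⟨⟨_, h1, h2⟩, h3⟩; exact ⟨h1, h3, h2⟩
  · rintro ⟨h1, h2, h3⟩; exact ⟨⟨by omega, h1, h3⟩, h2⟩

theorem sum_countP_swap (cs : List Char) (l : List Int) (P : Char → Int → Bool) :
    (cs.map (fun c => l.countP (P c))).sum = (l.map (fun x => cs.countP (fun c => P c x))).sum := by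
  induction cs with
  | nil => simp
  | cons c r ih =>
    simp only [List.map_cons, List.sum_cons, ih]
    rw [← PySem.List.sum_map_ite_one_zero_nat (P c) l, ← List.sum_map_add]
    congr 1
    apply List.map_congr_left
    intro x _
    rw [List.countP_cons]
    by_cases h : P c x <;> simp [h] <;> omega

theorem pyGetD_mem {α : Type} (s : List α) (i : Int) (v : α) (h0 : 0 ≤ i) (hN : i < (s.length : Int)) :
    PySem.List.pyGetD s i v ∈ s := by
  have : PySem.List.pyGet? s i = s[i.toNat]? := PySem.List.pyGet?_of_nonneg s h0
  have hlt : i.toNat < s.length := by omega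
  simp [PySem.List.pyGetD, this, List.getElem?_eq_getElem hlt]

theorem countP_dedup_pointwise (s : List Char) (d i : Int) (hi : 0 ≤ i) (hiN : i < (s.length : Int)) :
    (PySem.List.dedup s).countP (fun c => decide (i + d < (s.length : Int) ∧
        PySem.List.pyGetD s i ' ' = c ∧ PySem.List.pyGetD s (i + d) ' ' = c))
      = if (i + d < (s.length : Int) ∧ PySem.List.pyGetD s i ' ' = PySem.List.pyGetD s (i + d) ' ')
          then 1 else 0 := by
  split_ifs with h
  · obtain ⟨hlt, heq⟩ := h
    have hmem : PySem.List.pyGetD s i ' ' ∈ PySem.List.dedup s := by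
      rw [PySem.List.mem_dedup]; exact pyGetD_mem s i ' ' hi hiN
    have hcongr : (PySem.List.dedup s).countP (fun c => decide (i + d < (s.length : Int) ∧
        PySem.List.pyGetD s i ' ' = c ∧ PySem.List.pyGetD s (i + d) ' ' = c))
        = (PySem.List.dedup s).countP (fun c => PySem.List.pyGetD s i ' ' == c) := by
      apply List.countP_congr; intro c _
      simp only [decide_eq_true_eq, beq_iff_eq]
      constructor
      · rintro ⟨_, h1, _⟩; exact h1
      · rintro rfl; exact ⟨hlt, rfl, heq.symm⟩
    rw [hcongr]
    have : (PySem.List.dedup s).countP (fun c => PySem.List.pyGetD s i ' ' == c)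
        = (PySem.List.dedup s).count (PySem.List.pyGetD s i ' ') := by
      rw [List.count_eq_countP]; apply List.countP_congr; intro c _
      simp only [beq_iff_eq]; exact eq_comm
    rw [this, List.count_eq_one_of_mem (PySem.List.nodup_dedup s) hmem]
  · apply List.countP_eq_zero.mpr
    intro c _
    simp only [decide_eq_true_eq]
    rintro ⟨h1, h2, h3⟩
    exact h ⟨h1, by rw [h2, h3]⟩

theorem count_flatMap_chars (L : List Char) (g : Char → List Int) (d : Int) :
    ((L.flatMap g).count d) = (L.map (fun c => (g c).count d)).sum := by
  induction L with
  | nil => simp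
  | cons x r ih => simp [List.flatMap_cons, List.count_append, ih]

def pvCntN (s : List Char) (d : Int) : Nat :=
  (PySem.List.pyRange 0 ((s.length : Int) - d) 1).countP
    (fun i => decide (PySem.List.pyGetD s i ' ' = PySem.List.pyGetD s (i + d) ' '))

theorem counts_spec (s : List Char) (d : Int) (h1 : 1 ≤ d) (h2 : d < (s.length : Int)) :
    PySem.List.pyGetD ((PySem.List.dedup s).foldl (fun cs c => pvPairBumps (pvPos s c) cs)
        (List.replicate s.length 0)) d 0
      = (pvCntN s d : Int) := by
  rw [foldl_pvPairBumps_flat]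
  have hbound : ∀ j ∈ (PySem.List.dedup s).flatMap (fun c => pvDiffs (pvPos s c)),
      0 ≤ j ∧ j < ((List.replicate s.length (0:Int)).length : Int) := by
    intro j hj
    rw [List.mem_flatMap] at hj
    obtain ⟨c, _, hj⟩ := hj
    obtain ⟨x, y, hx, hy, hxy, rfl⟩ := mem_pvDiffs _ (pairwise_pvPos s c) _ hj
    rw [mem_pvPos] at hx hy
    simp only [List.length_replicate]
    omega
  rw [pyGetD_foldl_pvBump _ _ hbound d (by omega)]
  have hrep : PySem.List.pyGetD (List.replicate s.length (0:Int)) d 0 = 0 := by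
    rw [pyGetD_eq_getD _ _ (by omega)]
    rcases Nat.lt_or_ge d.toNat s.length with h | h
    · simp [List.getD_eq_getElem?_getD, List.getElem?_replicate, h]
    · simp [List.getD_eq_getElem?_getD, List.getElem?_eq_none (by simpa using h)]
  rw [hrep, count_flatMap_chars]
  have hper : ∀ c, (pvDiffs (pvPos s c)).count d
      = (PySem.List.pyRange 0 (s.length : Int) 1).countP
          (fun i => decide (i + d < (s.length : Int) ∧ PySem.List.pyGetD s i ' ' = c ∧
            PySem.List.pyGetD s (i + d) ' ' = c)) := by
    intro c
    rw [count_pvDiffs _ (pairwise_pvPos s c) d (by omega), countP_pvPos s c d (by omega)]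
  have hmapcong : (PySem.List.dedup s).map (fun c => (pvDiffs (pvPos s c)).count d)
      = (PySem.List.dedup s).map (fun c => (PySem.List.pyRange 0 (s.length : Int) 1).countP
          (fun i => decide (i + d < (s.length : Int) ∧ PySem.List.pyGetD s i ' ' = c ∧
            PySem.List.pyGetD s (i + d) ' ' = c))) := by
    apply List.map_congr_left; intro c _; exact hper c
  rw [hmapcong, sum_countP_swap]
  have hpt : (PySem.List.pyRange 0 (s.length : Int) 1).map (fun i => (PySem.List.dedup s).countP
        (fun c => decide (i + d < (s.length : Int) ∧ PySem.List.pyGetD s i ' ' = c ∧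
          PySem.List.pyGetD s (i + d) ' ' = c)))
      = (PySem.List.pyRange 0 (s.length : Int) 1).map (fun i =>
          if (i + d < (s.length : Int) ∧ PySem.List.pyGetD s i ' ' = PySem.List.pyGetD s (i + d) ' ')
          then 1 else 0) := by
    apply List.map_congr_left; intro i hi
    have hi' := (PySem.List.mem_pyRange_one).mp hi
    exact countP_dedup_pointwise s d i hi'.1 hi'.2
  rw [hpt]
  have hsum : (List.map (fun i => if (i + d < (s.length : Int) ∧
        PySem.List.pyGetD s i ' ' = PySem.List.pyGetD s (i + d) ' ') then 1 else 0)
        (PySem.List.pyRange 0 (s.length : Int) 1)).sum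
      = (PySem.List.pyRange 0 (s.length : Int) 1).countP (fun i => decide (i + d < (s.length : Int) ∧
        PySem.List.pyGetD s i ' ' = PySem.List.pyGetD s (i + d) ' ')) := by
    rw [← PySem.List.sum_map_ite_one_zero_nat]
    apply congrArg List.sum
    apply List.map_congr_left
    intro i _
    simp
  rw [hsum]
  -- now: countP over [0,N) with the bound conjunct = countP over [0,N-d) without it
  rw [PySem.List.pyRange_one_append 0 ((s.length : Int) - d) (s.length : Int) (by omega) (by omega),
    List.countP_append]
  have hz : (PySem.List.pyRange ((s.length : Int) - d) (s.length : Int) 1).countP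
      (fun i => decide (i + d < (s.length : Int) ∧ PySem.List.pyGetD s i ' ' = PySem.List.pyGetD s (i + d) ' ')) = 0 := by
    apply List.countP_eq_zero.mpr
    intro i hi
    have hi' := (PySem.List.mem_pyRange_one).mp hi
    simp only [decide_eq_true_eq]
    rintro ⟨hc, _⟩; omega
  rw [hz, Nat.add_zero, pvCntN, zero_add]
  congr 1
  apply List.countP_congr
  intro i hi
  have hi' := (PySem.List.mem_pyRange_one).mp hi
  simp only [decide_eq_true_eq]
  constructor
  · rintro ⟨_, h⟩; exact h
  · intro h; exact ⟨by omega, h⟩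


theorem A_coincidences (s : List Char) :
    (PySem.List.pyRange 1 (s.length : Int) 1).foldl (fun acc shift =>
      acc ++ [(PySem.List.pyRange 0 ((s.length : Int) - shift) 1).foldl (fun c i =>
        if PySem.List.pyGetD s i ' ' = PySem.List.pyGetD s (i + shift) ' ' then c + 1 else c) 0]) []
    = (PySem.List.pyRange 1 (s.length : Int) 1).map (fun d => (pvCntN s d : Int)) := by
  rw [PySem.List.foldl_append_singleton_eq_map, List.nil_append]
  apply List.map_congr_left
  intro d _
  rw [PySem.List.foldl_ite_add_one, zero_add, pvCntN]

theorem argmax_inv (g : Int → Int) : ∀ k, 2 ≤ k →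
    1 ≤ ((PySem.List.pyRange 2 k 1).foldl (fun best d => if g best < g d then d else best) 1) ∧
    ((PySem.List.pyRange 2 k 1).foldl (fun best d => if g best < g d then d else best) 1) < k ∧
    (∀ d, 1 ≤ d → d < k → g d ≤ g ((PySem.List.pyRange 2 k 1).foldl (fun best d => if g best < g d then d else best) 1)) ∧
    (∀ d, 1 ≤ d → d < ((PySem.List.pyRange 2 k 1).foldl (fun best d => if g best < g d then d else best) 1) → g d < g ((PySem.List.pyRange 2 k 1).foldl (fun best d => if g best < g d then d else best) 1)) := by
  intro k hk
  induction k, hk using Int.le_induction with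
  | base =>
      rw [PySem.List.pyRange_one_eq_nil (by omega)]
      simp only [List.foldl_nil]
      refine ⟨by omega, by omega, ?_, by omega⟩
      intro d hd1 hd2
      have : d = 1 := by omega
      rw [this]
  | succ k hk ih =>
      obtain ⟨hb1, hbk, hmax, hfirst⟩ := ih
      rw [PySem.List.pyRange_one_succ_right (by omega), List.foldl_append, List.foldl_cons, List.foldl_nil]
      set b := (PySem.List.pyRange 2 k 1).foldl (fun best d => if g best < g d then d else best) 1 with hbdef
      by_cases h : g b < g k
      · rw [if_pos h]
        refine ⟨by omega, by omega, ?_, ?_⟩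
        · intro d hd1 hd2
          rcases eq_or_ne d k with rfl | hne
          · exact le_refl _
          · exact le_of_lt (lt_of_le_of_lt (hmax d hd1 (by omega)) h)
        · intro d hd1 hd2
          exact lt_of_le_of_lt (hmax d hd1 (by omega)) h
      · rw [if_neg h]
        refine ⟨hb1, by omega, ?_, hfirst⟩
        intro d hd1 hd2
        rcases eq_or_ne d k with rfl | hne
        · omega
        · exact hmax d hd1 (by omega)

theorem A_result (g : Int → Int) (N : Int) (h2 : 2 ≤ N) (b : Int)
    (hb1 : 1 ≤ b) (hbN : b < N) (hmax : ∀ d, 1 ≤ d → d < N → g d ≤ g b)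
    (hfirst : ∀ d, 1 ≤ d → d < b → g d < g b) :
    (match PySem.List.max? ((PySem.List.pyRange 1 N 1).map g) (fun x => x) with
     | none => 0
     | some m => (((PySem.List.index? ((PySem.List.pyRange 1 N 1).map g) m).getD 0 : Nat) : Int) + 1) = b := by
  have hsplit : PySem.List.pyRange 1 N 1
      = (PySem.List.pyRange 1 b 1 ++ [b]) ++ PySem.List.pyRange (b+1) N 1 := by
    rw [PySem.List.pyRange_one_append 1 (b+1) N (by omega) (by omega),
      PySem.List.pyRange_one_succ_right (by omega)]
  have hne : ((PySem.List.pyRange 1 N 1).map g) ≠ [] := by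
    rw [hsplit]; simp
  have hne' : PySem.List.max? ((PySem.List.pyRange 1 N 1).map g) (fun x : Int => x) ≠ none :=
    fun h => hne ((PySem.List.max?_eq_none_iff ((PySem.List.pyRange 1 N 1).map g) (fun x : Int => x)).mp h)
  obtain ⟨m, hm⟩ := Option.ne_none_iff_exists'.mp hne'
  rw [hm]
  dsimp only
  have hmem := PySem.List.max?_mem (key := fun x : Int => x) hm
  have hismax := PySem.List.max?_isMax (key := fun x : Int => x) hm
  -- m = g b
  have hgb_mem : g b ∈ (PySem.List.pyRange 1 N 1).map g := by
    apply List.mem_map_of_mem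
    rw [PySem.List.mem_pyRange_one]; omega
  have hmgb : m = g b := by
    obtain ⟨d0, hd0, hd0g⟩ := List.mem_map.mp hmem
    rw [PySem.List.mem_pyRange_one] at hd0
    exact le_antisymm (hd0g ▸ hmax d0 (by omega) (by omega)) (hismax _ hgb_mem)
  -- index
  have hidx : PySem.List.index? ((PySem.List.pyRange 1 N 1).map g) m = some (b - 1).toNat := by
    rw [PySem.List.index?_eq_some_iff]
    refine ⟨(PySem.List.pyRange 1 b 1).map g, (PySem.List.pyRange (b+1) N 1).map g, ?_, ?_, ?_⟩
    · rw [hsplit, hmgb]; simp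
    · rw [List.length_map, PySem.List.length_pyRange_one]
    · rw [hmgb]
      intro hmem'
      obtain ⟨d, hd, hdg⟩ := List.mem_map.mp hmem'
      rw [PySem.List.mem_pyRange_one] at hd
      exact absurd hdg (ne_of_lt (hfirst d (by omega) (by omega)))
  rw [hidx]
  simp only [Option.getD_some]
  rw [Int.toNat_of_nonneg (by omega : (0:Int) ≤ b - 1)]
  exact sub_add_cancel b 1

theorem count_coincidences_spec : Claim_equal_count_coincidences := by
  unfold Claim_equal_count_coincidences
  intro t _ hpre
  unfold Spec_count_coincidences
  unfold Pre_count_coincidences at hpre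
  have h2 : 2 ≤ ((t.toList.length : Int)) := by exact_mod_cast hpre
  set s := t.toList with hs
  set C : List Int := (PySem.List.dedup s).foldl (fun cs c => pvPairBumps (pvPos s c) cs)
    (List.replicate s.length 0) with hC
  set b : Int := (PySem.List.pyRange 2 (s.length : Int) 1).foldl
    (fun best d => if PySem.List.pyGetD C best 0 < PySem.List.pyGetD C d 0 then d else best) 1 with hb
  have hBdef : count_coincidences_alt t = b := rfl
  have hG : ∀ d, 1 ≤ d → d < (s.length : Int) → PySem.List.pyGetD C d 0 = (pvCntN s d : Int) :=
    fun d h1 hd => counts_spec s d h1 hd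
  obtain ⟨hb1, hbN, hmax, hfirst⟩ := argmax_inv (fun x => PySem.List.pyGetD C x 0) (s.length : Int) h2
  have hmax' : ∀ d, 1 ≤ d → d < (s.length : Int) → (pvCntN s d : Int) ≤ (pvCntN s b : Int) := by
    intro d hd1 hd2
    rw [← hG d hd1 hd2, ← hG b (by omega) (by omega)]
    exact hmax d hd1 hd2
  have hfirst' : ∀ d, 1 ≤ d → d < b → (pvCntN s d : Int) < (pvCntN s b : Int) := by
    intro d hd1 hd2
    rw [← hG d hd1 (by omega), ← hG b (by omega) (by omega)]
    exact hfirst d hd1 hd2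
  have hA : count_coincidences t = b := by
    dsimp only [count_coincidences]
    rw [← hs]
    rw [A_coincidences s]
    exact A_result (fun d => (pvCntN s d : Int)) (s.length : Int) h2 b hb1 hbN hmax' hfirst'
  rw [hA, hBdef]
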